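-- pv_equiv track=rewrite | github.com/Dylan0708/Hopstack | ingredients_func.py | note_format
-- ===== SOURCE A (Python) =====
-- def note_format(note):
--     note_list = []
--     space_listen = False
--     char_count = 0
--
--     for i in note:
--         char_count += 1
--         if char_count == 70:
--             space_listen = True
--         if space_listen == True:
--             if i == ' ':
--                 note_list.append('\n')
--                 space_listen = False
--                 char_count = 0
--             else:
--                 note_list.append(i)
--         else:
--             note_list.append(i)
--
--     note_formatted = ''.join(note_list)
--     return note_formatted
-- ===== SOURCE B (Python) =====
-- def note_format(note):
--     idx = note.find(' ', 69)
--     if idx == -1: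
--         return note
--     return note[:idx] + '\n' + note_format(note[idx + 1:])
-- ===== Notes on version B (the rewrite author's own statement) =====
-- stated objective: faster
-- what changed: Replaces A's char-by-char loop with a counter and space_listen flag by jumping directly from one break space to the next via str.find with a start offset of 69, recursing on the remaining suffix.
import Mathlib
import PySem

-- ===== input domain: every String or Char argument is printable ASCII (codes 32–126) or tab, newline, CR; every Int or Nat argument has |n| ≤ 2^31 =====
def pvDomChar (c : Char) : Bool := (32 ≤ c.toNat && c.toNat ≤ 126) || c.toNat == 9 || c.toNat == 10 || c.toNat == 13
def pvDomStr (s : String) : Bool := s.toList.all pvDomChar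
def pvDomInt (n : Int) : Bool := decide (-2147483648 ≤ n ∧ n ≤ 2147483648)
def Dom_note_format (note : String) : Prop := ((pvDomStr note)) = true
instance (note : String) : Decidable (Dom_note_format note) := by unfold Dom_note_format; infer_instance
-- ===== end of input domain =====

-- B replaces A's char-by-char counter/flag loop by jumping straight from one break
-- space to the next with str.find (start offset 69) and recursing on the remaining
-- suffix (objective: faster by a constant factor — find scans in C).

-- ===== PORT A =====
-- state = (note_list, space_listen, char_count); one step of A's for-loop body
def noteStep (st : List Char × Bool × Nat) (i : Char) : List Char × Bool × Nat :=
  let char_count := st.2.2 + 1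
  let space_listen := if char_count == 70 then true else st.2.1
  if space_listen then
    if i == ' ' then (st.1 ++ ['\n'], false, 0)
    else (st.1 ++ [i], space_listen, char_count)
  else (st.1 ++ [i], space_listen, char_count)

def note_format (note : String) : String :=
  String.ofList (note.toList.foldl noteStep ([], false, 0)).1

-- ===== PORT B =====
-- Source B works on the string; the port works on the code-point list (PySem.Str.* are thin
-- wrappers over the same Chars functions).  fuel (= length + 1) only makes the recursion
-- structural; the 0 case is never reached.
def noteFixGo : Nat → List Char → List Char
  | 0, cs => cs
  | fuel + 1, cs =>
    let idx := PySem.Chars.findFrom cs [' '] 69 none       -- note.find(' ', 69)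
    if idx = -1 then cs
    else PySem.List.slice cs none (some idx) ++             -- note[:idx]
         '\n' :: noteFixGo fuel (PySem.List.slice cs (some (idx + 1)) none)  -- note[idx+1:]

def note_format_alt (note : String) : String :=
  String.ofList (noteFixGo (note.toList.length + 1) note.toList)

-- ===== PRECONDITION & SPEC =====
def Spec_note_format (note : String) (out : String) : Prop := out = note_format_alt note
instance (note : String) (out : String) : Decidable (Spec_note_format note out) := by unfold Spec_note_format; infer_instance

-- ===== CLAIM (what is proved, stated in full; the proofs are below) =====
def Claim_equal_note_format : Prop := ∀ (note : String), Dom_note_format note → Spec_note_format note (note_format note)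

-- ===== LEMMAS AND PROOFS =====

-- common reference function: copy k chars unchanged, then replace the next space by '\n'
-- and restart with k = 69
def wrapSpec : List Char → Nat → List Char
  | [], _ => []
  | c :: t, k + 1 => c :: wrapSpec t k
  | c :: t, 0 => if c = ' ' then '\n' :: wrapSpec t 69 else c :: wrapSpec t 0

-- ---- A-side: the fold computes wrapSpec ----
theorem noteStep_fold (l : List Char) :
    (∀ (acc : List Char) (k : Nat), k ≤ 69 →
      (l.foldl noteStep (acc, false, 69 - k)).1 = acc ++ wrapSpec l k) ∧
    (∀ (acc : List Char) (c : Nat),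
      (l.foldl noteStep (acc, true, c)).1 = acc ++ wrapSpec l 0) := by
  induction l with
  | nil => simp [wrapSpec]
  | cons i t ih =>
    constructor
    · intro acc k hk
      match k with
      | 0 =>
        by_cases hsp : i = ' '
        · have h69 : (t.foldl noteStep (acc ++ ['\n'], false, 0)).1
              = (acc ++ ['\n']) ++ wrapSpec t 69 := by
            have := ih.1 (acc ++ ['\n']) 69 (by omega)
            simpa using this
          simp [List.foldl, noteStep, hsp, wrapSpec, h69]
        · have := ih.2 (acc ++ [i]) 70
          simp [List.foldl, noteStep, hsp, wrapSpec, this]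
      | k' + 1 =>
        have hne : ¬ (69 - k' = 70) := by omega
        have heq : 68 - k' + 1 = 69 - k' := by omega
        have := ih.1 (acc ++ [i]) k' (by omega)
        simp [List.foldl, noteStep, hne, heq, wrapSpec, this]
    · intro acc c
      by_cases hsp : i = ' '
      · have h69 : (t.foldl noteStep (acc ++ ['\n'], false, 0)).1
            = (acc ++ ['\n']) ++ wrapSpec t 69 := by
          have := ih.1 (acc ++ ['\n']) 69 (by omega)
          simpa using this
        by_cases h70 : c + 1 = 70 <;>
          simp [List.foldl, noteStep, hsp, h70, wrapSpec, h69]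
      · have := ih.2 (acc ++ [i]) (c + 1)
        by_cases h70 : c + 1 = 70
        · rw [h70] at this
          simp [List.foldl, noteStep, hsp, h70, wrapSpec, this]
        · simp [List.foldl, noteStep, hsp, h70, wrapSpec, this]

theorem note_format_eq_wrapSpec (note : String) :
    note_format note = String.ofList (wrapSpec note.toList 69) := by
  have := (noteStep_fold note.toList).1 [] 69 (by omega)
  simp only [note_format]
  exact congrArg String.ofList (by simpa using this)

-- ---- B-side ----
theorem wrapSpec_no_space (cs : List Char) (k : Nat)
    (h : ∀ c ∈ cs.drop k, c ≠ ' ') : wrapSpec cs k = cs := by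
  induction cs generalizing k with
  | nil => simp [wrapSpec]
  | cons c t ih =>
    match k with
    | 0 =>
      have hc : c ≠ ' ' := h c (by simp)
      have := ih 0 (by intro x hx; exact h x (by simpa using Or.inr hx))
      simp [wrapSpec, hc, this]
    | k' + 1 =>
      have := ih k' (by simpa using h)
      simp [wrapSpec, this]

theorem wrapSpec_first_space (cs : List Char) (k j : Nat)
    (hkj : k ≤ j) (hj : j < cs.length) (hsp : cs[j] = ' ')
    (hmin : ∀ i, k ≤ i → i < j → (hi : i < cs.length) → cs[i] ≠ ' ') :
    wrapSpec cs k = cs.take j ++ '\n' :: wrapSpec (cs.drop (j + 1)) 69 := by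
  induction cs generalizing k j with
  | nil => simp at hj
  | cons c t ih =>
    match k, j with
    | 0, 0 =>
      simp at hsp
      simp [wrapSpec, hsp]
    | 0, j' + 1 =>
      have hc : c ≠ ' ' := hmin 0 (by omega) (by omega) (by simp)
      have := ih 0 j' (by omega) (by simpa using hj) (by simpa using hsp)
        (by intro i h0 hij hi; exact hmin (i + 1) (by omega) (by omega) (by simpa using hi))
      simp [wrapSpec, hc, this]
    | k' + 1, j' + 1 =>
      have := ih k' j' (by omega) (by simpa using hj) (by simpa using hsp)
        (by intro i h0 hij hi; exact hmin (i + 1) (by omega) (by omega) (by simpa using hi))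
      simp [wrapSpec, this]

-- value of note.find(' ', 69) in terms of Chars.find on the dropped list
theorem findFrom_69 (cs : List Char) (h : 69 ≤ cs.length) :
    PySem.Chars.findFrom cs [' '] 69 none =
      if PySem.Chars.find (cs.drop 69) [' '] = -1 then -1
      else 69 + PySem.Chars.find (cs.drop 69) [' '] := by
  have := PySem.Chars.findFrom_natCast cs [' '] 69 h
  simpa using this

theorem findFrom_69_short (cs : List Char) (h : cs.length < 69) :
    PySem.Chars.findFrom cs [' '] 69 none = -1 := by
  simp only [PySem.Chars.findFrom]
  split_ifs with h2 <;> first | rfl | (exfalso; omega)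

theorem noteFixGo_eq_wrapSpec (fuel : Nat) (cs : List Char) (hf : cs.length < fuel) :
    noteFixGo fuel cs = wrapSpec cs 69 := by
  induction fuel generalizing cs with
  | zero => omega
  | succ f ih =>
    by_cases hlen : cs.length < 69
    · have hW : wrapSpec cs 69 = cs :=
        wrapSpec_no_space cs 69 (by simp [List.drop_eq_nil_of_le (by omega : cs.length ≤ 69)])
      simp [noteFixGo, findFrom_69_short cs hlen, hW]
    · have hlen' : 69 ≤ cs.length := by omega
      rw [noteFixGo, findFrom_69 cs hlen']
      by_cases hr : PySem.Chars.find (cs.drop 69) [' '] = -1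
      · have hW : wrapSpec cs 69 = cs := by
          apply wrapSpec_no_space
          intro c hc hcsp
          subst hcsp
          obtain ⟨a, b, hab⟩ := List.mem_iff_append.1 hc
          exact (PySem.Chars.find_eq_neg_one_iff _ _).1 hr ⟨a, b, by simp [hab]⟩
        simp [hr, hW]
      · have hr0 : 0 ≤ PySem.Chars.find (cs.drop 69) [' '] := by
          have := PySem.Chars.neg_one_le_find (cs.drop 69) [' ']
          omega
        obtain ⟨hpre, hmin⟩ := PySem.Chars.find_spec hr0
        set r := PySem.Chars.find (cs.drop 69) [' '] with hrdef
        set j : Nat := 69 + r.toNat with hjdef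
        have hdd : ∀ m : Nat, (cs.drop 69).drop m = cs.drop (69 + m) := by
          intro m; rw [List.drop_drop]
        rw [hdd] at hpre
        obtain ⟨rest, hps⟩ := hpre
        have hjlt : j < cs.length := by
          by_contra hge
          have : cs.drop j = [] := List.drop_eq_nil_of_le (by omega)
          rw [this] at hps
          simp at hps
        have hcons : cs[j] :: cs.drop (j + 1) = cs.drop j := List.getElem_cons_drop hjlt
        rw [← hcons] at hps
        have hspj : cs[j] = ' ' := by
          have h := hps
          simp only [List.singleton_append] at h
          exact (List.cons_eq_cons.mp h).1.symm
        have hminabs : ∀ i, 69 ≤ i → i < j → (hi : i < cs.length) → cs[i] ≠ ' ' := by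
          intro i h69 hij hi hsp'
          apply hmin (i - 69) (by omega)
          rw [hdd, (by omega : 69 + (i - 69) = i)]
          refine ⟨cs.drop (i + 1), ?_⟩
          rw [← List.getElem_cons_drop hi, hsp']
          simp
        have hW := wrapSpec_first_space cs 69 j (by omega) hjlt hspj hminabs
        have hne : ¬ ((69 : Int) + r = -1) := by omega
        have hcast : (69 : Int) + r = ((j : Nat) : Int) := by
          rw [hjdef]; omega
        have hcast2 : ((j : Nat) : Int) + 1 = (((j + 1 : Nat)) : Int) := by push_cast; ring
        rw [if_neg hr, if_neg hne, hcast, hcast2,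
          PySem.List.slice_to_natCast, PySem.List.slice_from_natCast,
          ih (cs.drop (j + 1)) (by simp; omega), hW]

-- ===== VERDICT (by name: the statement is the Claim_ definition above) =====
theorem note_format_spec : Claim_equal_note_format := by
  intro note _
  unfold Spec_note_format
  rw [note_format_eq_wrapSpec]
  unfold note_format_alt
  exact congrArg String.ofList (noteFixGo_eq_wrapSpec _ _ (by omega)).symm
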